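-- pv_equiv track=rewrite | github.com/lawang24/competitive-programming-archive | USACO/2017B3.py | solve
-- ===== SOURCE A (Python) =====
-- def solve(n, grid):
--     usable = set()
--     visited = set()
--
--     for row in grid:
--         curr = 0
--         seen = set()
--         for val in row:
--             if val not in visited:
--                 usable.add(val)
--                 visited.add(val)
--
--             # part of rectangle
--             if curr!=val:
--                 if val not in seen:
--                     seen.add(val)
--                 elif val in usable:
--                     usable.remove(val)
--             curr = val
--
--     if 0 in usable:
--         usable.remove(0)
--
--     return usable
-- ===== SOURCE B (Python) =====
-- def solve(n, grid):
--     # One pass over the cells: collect the appearing colors (first-appearance order)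
--     # and, per row, an index  color -> (first column, last column, cell count);
--     # a color is bad in a row iff its occurrences there are not one contiguous block,
--     # i.e. last - first + 1 != count.
--     order = []
--     known = set()
--     bad = set()
--     for row in grid:
--         info = {}
--         for i, v in enumerate(row):
--             if v not in known:
--                 known.add(v)
--                 order.append(v)
--             if v in info:
--                 f, l, cnt = info[v]
--                 info[v] = (f, i, cnt + 1)
--             else:
--                 info[v] = (i, i, 1)
--         for c, (f, l, cnt) in info.items():
--             if l - f + 1 != cnt:
--                 bad.add(c)
--     return {c for c in order if c != 0 and c not in bad}
-- ===== Notes on version B (the rewrite author's own statement) =====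
-- stated objective: alternative
-- what changed: A streams over the cells once, maintaining live usable/visited/seen sets with on-the-fly removals at repeated run starts; B builds, per row, an index color -> (first column, last column, count) in one pass and then, in a separate pass over that table, marks a color bad iff last - first + 1 != count in some row, finally returning the appearing colors that are never bad, minus 0.
import Mathlib
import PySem

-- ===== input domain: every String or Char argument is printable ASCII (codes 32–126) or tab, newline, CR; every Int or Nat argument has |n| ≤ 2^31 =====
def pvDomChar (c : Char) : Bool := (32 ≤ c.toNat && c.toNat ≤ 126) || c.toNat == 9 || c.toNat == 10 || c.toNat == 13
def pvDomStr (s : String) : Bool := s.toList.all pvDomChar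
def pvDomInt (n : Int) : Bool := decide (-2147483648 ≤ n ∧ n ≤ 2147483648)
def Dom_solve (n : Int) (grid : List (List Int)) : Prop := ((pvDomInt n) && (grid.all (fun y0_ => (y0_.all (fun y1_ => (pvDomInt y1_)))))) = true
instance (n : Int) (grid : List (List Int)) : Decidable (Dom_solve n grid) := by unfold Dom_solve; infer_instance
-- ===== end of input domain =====

-- B replaces A's single streaming pass (live usable/visited/seen sets with on-the-fly
-- removals) by a collect-then-test decomposition: one pass builds, per row, an index
-- color -> (first column, last column, count); a second pass keeps the colors that form one
-- contiguous block in every row they occupy, discarding 0.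

-- ===== PORT A =====
-- the body of A's inner 'for val in row' loop; Python's 'usable.remove(val)' runs under the
-- guard 'val in usable', where set.remove equals Set.discard exactly
def stepA (s : (PySem.Set Int × PySem.Set Int) × Int × PySem.Set Int) (val : Int) :
    (PySem.Set Int × PySem.Set Int) × Int × PySem.Set Int :=
  let usable := s.1.1
  let visited := s.1.2
  let curr := s.2.1
  let seen := s.2.2
  let uv := if ¬ visited.contains val then (usable.add val, visited.add val) else (usable, visited)
  let us :=
    if curr ≠ val then
      if ¬ seen.contains val then (uv.1, seen.add val)
      else if uv.1.contains val then (uv.1.discard val, seen)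
      else (uv.1, seen)
    else (uv.1, seen)
  ((us.1, uv.2), val, us.2)

-- the body of A's outer 'for row in grid' loop (curr = 0, seen = set() at each row start)
def rowA (st : PySem.Set Int × PySem.Set Int) (row : List Int) : PySem.Set Int × PySem.Set Int :=
  let r := row.foldl stepA ((st.1, st.2), 0, PySem.Set.empty)
  (r.1.1, r.1.2)


def solve (n : Int) (grid : List (List Int)) : List Int :=
  let st := grid.foldl rowA (PySem.Set.empty, PySem.Set.empty)
  if st.1.contains 0 then st.1.discard 0 else st.1


-- ===== PORT B =====
-- body of B's per-cell loop 'for i, v in enumerate(row)': record first appearances and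
-- maintain the row index  color -> (first column, last column, count)
def stepCell (st : (List Int × PySem.Set Int) × PySem.Dict Int (Int × Int × Int))
    (iv : Int × Int) : (List Int × PySem.Set Int) × PySem.Dict Int (Int × Int × Int) :=
  let ok := if ¬ st.1.2.contains iv.2 then (st.1.1 ++ [iv.2], st.1.2.add iv.2) else st.1
  let info :=
    match st.2.get? iv.2 with
    | some t => st.2.insert iv.2 (t.1, iv.1, t.2.2 + 1)
    | none => st.2.insert iv.2 (iv.1, iv.1, 1)
  (ok, info)

-- body of B's 'for row in grid' loop: build the row index, then mark the non-contiguous colors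
def rowB (st : (List Int × PySem.Set Int) × PySem.Set Int) (row : List Int) :
    (List Int × PySem.Set Int) × PySem.Set Int :=
  let r := (PySem.List.enumerate row).foldl stepCell (st.1, PySem.Dict.empty)
  let bad := r.2.items.foldl
    (fun b it => if it.2.2.1 - it.2.1 + 1 ≠ it.2.2.2 then PySem.Set.add b it.1 else b) st.2
  (r.1, bad)

def solve_alt (n : Int) (grid : List (List Int)) : List Int :=
  let r := grid.foldl rowB (([], PySem.Set.empty), PySem.Set.empty)
  PySem.Set.ofList (r.1.1.filter (fun c => c != 0 && !(r.2.contains c)))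

-- ===== PRECONDITION & SPEC =====
def Spec_solve (n : Int) (grid : List (List Int)) (out : List Int) : Prop := out = solve_alt n grid
instance (n : Int) (grid : List (List Int)) (out : List Int) : Decidable (Spec_solve n grid out) := by unfold Spec_solve; infer_instance

-- ===== CLAIM (what is proved, stated in full; the proofs are below) =====
def Claim_equal_solve : Prop := ∀ (n : Int) (grid : List (List Int)), Dom_solve n grid → Spec_solve n grid (solve n grid)

-- ===== LEMMAS AND PROOFS =====

-- number of run starts of colour c in xs when the cell before xs holds prev
def pvRs (c prev : Int) (xs : List Int) : Nat :=
  match xs with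
  | [] => 0
  | x :: t => (if x = c ∧ prev ≠ c then 1 else 0) + pvRs c x t
def pvIdxs (c k : Int) (xs : List Int) : List Int :=
  match xs with
  | [] => []
  | x :: t => (if x = c then [k] else []) ++ pvIdxs c (k + 1) t
def pvOk (l : List Int) : Bool := l.isEmpty || (l.getLastD 0 - l.headD 0 + 1 == (l.length : Int))

theorem pvRs_append (c : Int) : ∀ (p : List Int) (prev v : Int),
    pvRs c prev (p ++ [v]) = pvRs c prev p + (if v = c ∧ p.getLastD prev ≠ c then 1 else 0) := by
  intro p
  induction p with
  | nil => intro prev v; simp [pvRs]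
  | cons x t ih => intro prev v; simp only [List.cons_append, pvRs, ih, List.getLastD_cons]; omega

theorem pvRs_zero_of_not_mem {c : Int} {p : List Int} (hc : c ∉ p) : ∀ (prev : Int),
    pvRs c prev p = 0 := by
  induction p with
  | nil => intro _; rfl
  | cons x t ih =>
    intro prev
    simp only [List.mem_cons, not_or] at hc
    have hx : ¬ (x = c) := fun h => hc.1 h.symm
    simp [pvRs, ih hc.2, hx]

theorem pvRs_zero_iff {c : Int} : ∀ {t : List Int} {prev : Int}, prev ≠ c →
    (pvRs c prev t = 0 ↔ c ∉ t) := by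
  intro t
  induction t with
  | nil => intro prev _; simp [pvRs]
  | cons x t ih =>
    intro prev hpc
    by_cases hx : x = c
    · subst hx; simp [pvRs, hpc]
    · have hcx : ¬ (c = x) := fun h => hx h.symm
      simp [pvRs, hx, ih hx, hcx]

theorem pvIdxs_eq_nil_iff {c : Int} : ∀ {t : List Int} {k : Int}, (pvIdxs c k t = [] ↔ c ∉ t) := by
  intro t
  induction t with
  | nil => intro k; simp [pvIdxs]
  | cons x t ih =>
    intro k
    by_cases hx : x = c
    · subst hx; simp [pvIdxs]
    · have hcx : ¬ (c = x) := fun h => hx h.symm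
      simp [pvIdxs, hx, ih, hcx]

theorem pvIdxs_last_ge {c : Int} : ∀ {t : List Int} {k : Int}, pvIdxs c k t ≠ [] →
    k + (pvIdxs c k t).length - 1 ≤ (pvIdxs c k t).getLastD 0 := by
  intro t
  induction t with
  | nil => intro k h; simp [pvIdxs] at h
  | cons x t ih =>
    intro k h
    by_cases hx : x = c
    · rw [pvIdxs, if_pos hx, List.singleton_append] at h ⊢
      rcases hl : pvIdxs c (k + 1) t with _ | ⟨a, l⟩
      · simp
      · have h2 : pvIdxs c (k + 1) t ≠ [] := by rw [hl]; simp
        have := ih (k := k + 1) h2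
        rw [hl] at this
        simp only [List.getLastD_cons, List.length_cons] at this ⊢
        push_cast at this ⊢
        omega
    · rw [pvIdxs, if_neg hx, List.nil_append] at h ⊢
      have := ih (k := k + 1) h
      push_cast at this ⊢; omega

theorem pvRs_cc_iff {c : Int} : ∀ {t : List Int} (k : Int),
    (pvRs c c t = 0 ↔ pvOk (k :: pvIdxs c (k + 1) t) = true) := by
  intro t
  induction t with
  | nil => intro k; simp [pvRs, pvIdxs, pvOk]
  | cons x t ih =>
    intro k
    by_cases hx : x = c
    · subst hx
      have h1 : pvRs x x (x :: t) = pvRs x x t := by simp [pvRs]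
      have h2 : pvIdxs x (k + 1) (x :: t) = (k + 1) :: pvIdxs x (k + 1 + 1) t := by
        simp [pvIdxs]
      rw [h1, h2, ih (k + 1)]
      rcases hl : pvIdxs x (k + 1 + 1) t with _ | ⟨a, l⟩
      · simp [pvOk]
      · constructor <;> intro hok <;>
          · simp only [pvOk, List.isEmpty_cons, List.getLastD_cons, List.headD_cons,
              List.length_cons, Bool.false_or, beq_iff_eq] at hok ⊢
            push_cast at hok ⊢
            omega
    · have h1 : pvRs c c (x :: t) = pvRs c x t := by simp [pvRs, hx]
      have h2 : pvIdxs c (k + 1) (x :: t) = pvIdxs c (k + 1 + 1) t := by simp [pvIdxs, hx]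
      rw [h1, h2]
      by_cases hct : c ∈ t
      · have hne : pvIdxs c (k + 1 + 1) t ≠ [] := by
          rw [Ne, pvIdxs_eq_nil_iff]; simpa using hct
        have hrs : pvRs c x t ≠ 0 := by
          rw [Ne, pvRs_zero_iff hx]; simpa using hct
        rcases hl : pvIdxs c (k + 1 + 1) t with _ | ⟨a, l⟩
        · exact absurd hl hne
        · have hge : (k + 1 + 1) + ((a :: l).length : Int) - 1 ≤ (a :: l).getLastD 0 := by
            have h5 := pvIdxs_last_ge (c := c) (t := t) (k := k + 1 + 1) hne
            rw [hl] at h5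
            exact_mod_cast h5
          constructor
          · intro h0; exact absurd h0 hrs
          · intro hok
            exfalso
            simp only [pvOk, List.isEmpty_cons, List.getLastD_cons, List.headD_cons,
              List.length_cons, Bool.false_or, beq_iff_eq] at hok
            simp only [List.length_cons, List.getLastD_cons] at hge
            push_cast at hok hge
            omega
      · have hnil : pvIdxs c (k + 1 + 1) t = [] := pvIdxs_eq_nil_iff.mpr hct
        have hrs : pvRs c x t = 0 := (pvRs_zero_iff hx).mpr hct
        rw [hnil, hrs]
        simp [pvOk]
theorem pvRs_le_one_iff {c : Int} : ∀ {t : List Int} {prev : Int} (k : Int), prev ≠ c →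
    (pvRs c prev t ≤ 1 ↔ pvOk (pvIdxs c k t) = true) := by
  intro t
  induction t with
  | nil => intro prev k _; simp [pvRs, pvOk, pvIdxs]
  | cons x t ih =>
    intro prev k hpc
    by_cases hx : x = c
    · subst hx
      have h1 : pvRs x prev (x :: t) = 1 + pvRs x x t := by simp [pvRs, hpc]
      have h2 : pvIdxs x k (x :: t) = k :: pvIdxs x (k + 1) t := by simp [pvIdxs]
      rw [h1, h2, ← pvRs_cc_iff k]
      omega
    · have h1 : pvRs c prev (x :: t) = pvRs c x t := by simp [pvRs, hx]
      have h2 : pvIdxs c k (x :: t) = pvIdxs c (k + 1) t := by simp [pvIdxs, hx]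
      rw [h1, h2, ih (k + 1) hx]


def pvHist (rows : List (List Int)) (c : Int) : Bool := rows.all (fun r => decide (pvRs c 0 r ≤ 1))
def pvQ (h : Int → Bool) (p : List Int) (c : Int) : Bool := h c && decide (pvRs c 0 p ≤ 1)

theorem inner_inv (h : Int → Bool) : ∀ (cells p V seen : List Int),
    V.Nodup →
    (∀ c, c ∉ V → h c = true) →
    (∀ c ∈ p, c ∈ V) →
    (∀ c : Int, c ∈ seen ↔ 1 ≤ pvRs c 0 p) →
    (cells.foldl stepA ((V.filter (pvQ h p), V), p.getLastD 0, seen)).1 =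
      ((PySem.Set.update V cells).filter (pvQ h (p ++ cells)), PySem.Set.update V cells) := by
  intro cells
  induction cells with
  | nil =>
    intro p V seen _ _ _ _
    simp [PySem.Set.update]
  | cons v rest ih =>
    intro p V seen hnd hout hpV hseen
    have hC : ∀ c : Int, pvRs c 0 (p ++ [v]) =
        pvRs c 0 p + (if v = c ∧ p.getLastD 0 ≠ c then 1 else 0) := fun c => pvRs_append c p 0 v
    have happ : p ++ v :: rest = (p ++ [v]) ++ rest := by simp
    rw [List.foldl_cons, PySem.Set.update_cons, happ]
    by_cases hv : v ∈ V
    · have hadd : PySem.Set.add V v = V := PySem.Set.add_of_mem hv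
      have hpV' : ∀ c ∈ p ++ [v], c ∈ V := by
        intro c hc
        rcases List.mem_append.mp hc with h1 | h1
        · exact hpV c h1
        · exact (List.mem_singleton.mp h1) ▸ hv
      by_cases hcv : p.getLastD 0 = v
      · -- curr == val: nothing happens
        have hcv2 : p.getLast?.getD 0 = v := by simpa [List.getLastD_eq_getLast?] using hcv
        have hrsEq : ∀ c : Int, pvRs c 0 (p ++ [v]) = pvRs c 0 p := by
          intro c; rw [hC c]
          by_cases hvc : v = c
          · subst hvc; simp [hcv2]
          · simp [hvc]
        have hQ : ∀ c ∈ V, pvQ h p c = pvQ h (p ++ [v]) c := by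
          intro c _; simp [pvQ, hrsEq c]
        have hstep : stepA ((V.filter (pvQ h p), V), p.getLastD 0, seen) v
            = ((V.filter (pvQ h (p ++ [v])), V), (p ++ [v]).getLastD 0, seen) := by
          simp [stepA, hv, hcv2, List.filter_congr hQ]
          try exact hcv2
        rw [hstep, hadd]
        exact ih (p ++ [v]) V seen hnd hout hpV'
          (by intro c; rw [hseen c, hrsEq c])
      · have hcv2 : ¬ p.getLast?.getD 0 = v := by simpa [List.getLastD_eq_getLast?] using hcv
        by_cases hs : v ∈ seen
        · -- later run start: removal branch
          have hrs1 : 1 ≤ pvRs v 0 p := (hseen v).mp hs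
          have hrsv : pvRs v 0 (p ++ [v]) = pvRs v 0 p + 1 := by rw [hC v]; simp [hcv2]
          have hrsO : ∀ c : Int, v ≠ c → pvRs c 0 (p ++ [v]) = pvRs c 0 p := by
            intro c hvc; rw [hC c]; simp [hvc]
          have hseen' : ∀ c : Int, c ∈ seen ↔ 1 ≤ pvRs c 0 (p ++ [v]) := by
            intro c; rw [hseen c]
            by_cases hvc : v = c
            · subst hvc; rw [hrsv]; omega
            · rw [hrsO c hvc]
          by_cases hq : pvQ h p v = true
          · have hQ : ∀ c ∈ V, (!(c == v) && pvQ h p c) = pvQ h (p ++ [v]) c := by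
              intro c _
              by_cases hvc : c = v
              · subst hvc
                have hd : ¬ (pvRs c 0 p + 1 ≤ 1) := by omega
                simp [pvQ, hrsv, hd]
              · simp [pvQ, hvc, hrsO c (fun hh => hvc hh.symm)]
            have hmemu : v ∈ V.filter (pvQ h p) := List.mem_filter.mpr ⟨hv, hq⟩
            have hstep : stepA ((V.filter (pvQ h p), V), p.getLastD 0, seen) v
                = ((V.filter (pvQ h (p ++ [v])), V), (p ++ [v]).getLastD 0, seen) := by
              simp [stepA, hv, hcv2, hs, hmemu, PySem.Set.discard, List.filter_filter,
                List.filter_congr hQ]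
              try exact hcv2
            rw [hstep, hadd]
            exact ih (p ++ [v]) V seen hnd hout hpV' hseen'
          · have hq' : pvQ h p v = false := by simpa using hq
            have hmemu : v ∉ V.filter (pvQ h p) := by
              intro hmem
              have h2 := (List.mem_filter.mp hmem).2
              rw [hq'] at h2
              cases h2
            have hd : ¬ (pvRs v 0 p + 1 ≤ 1) := by omega
            have hq2 : pvQ h (p ++ [v]) v = false := by simp [pvQ, hrsv, hd]
            have hQ : ∀ c ∈ V, pvQ h p c = pvQ h (p ++ [v]) c := by
              intro c _
              by_cases hvc : c = v
              · rw [hvc, hq2, hq']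
              · rw [pvQ, pvQ, hrsO c (fun hh => hvc hh.symm)]
            have hstep : stepA ((V.filter (pvQ h p), V), p.getLastD 0, seen) v
                = ((V.filter (pvQ h (p ++ [v])), V), (p ++ [v]).getLastD 0, seen) := by
              simp [stepA, hv, hcv2, hs, List.filter_congr hQ, hq2]
              try exact hcv2
            rw [hstep, hadd]
            exact ih (p ++ [v]) V seen hnd hout hpV' hseen'
        · -- first run start of v in this row
          have hrs0 : pvRs v 0 p = 0 := by
            have h1 : ¬ 1 ≤ pvRs v 0 p := fun hle => hs ((hseen v).mpr hle)
            omega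
          have hrsv : pvRs v 0 (p ++ [v]) = 1 := by rw [hC v]; simp [hcv2, hrs0]
          have hrsO : ∀ c : Int, v ≠ c → pvRs c 0 (p ++ [v]) = pvRs c 0 p := by
            intro c hvc; rw [hC c]; simp [hvc]
          have hQ : ∀ c ∈ V, pvQ h p c = pvQ h (p ++ [v]) c := by
            intro c _
            by_cases hvc : c = v
            · subst hvc; simp [pvQ, hrsv, hrs0]
            · rw [pvQ, pvQ, hrsO c (fun hh => hvc hh.symm)]
          have hstep : stepA ((V.filter (pvQ h p), V), p.getLastD 0, seen) v
              = ((V.filter (pvQ h (p ++ [v])), V), (p ++ [v]).getLastD 0,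
                  PySem.Set.add seen v) := by
            simp [stepA, hv, hcv2, hs, List.filter_congr hQ]
            try exact hcv2
          rw [hstep, hadd]
          exact ih (p ++ [v]) V (PySem.Set.add seen v) hnd hout hpV'
            (by intro c
                rw [PySem.Set.mem_add, hseen c]
                by_cases hvc : c = v
                · subst hvc; rw [hrsv]; simp
                · rw [hrsO c (fun hh => hvc hh.symm)]; simp [hvc])
    · -- v not yet visited: it is added to usable and visited
      have hvp : v ∉ p := fun hm => hv (hpV v hm)
      have hrs0 : pvRs v 0 p = 0 := pvRs_zero_of_not_mem hvp 0
      have hsv : v ∉ seen := fun hm => by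
        have := (hseen v).mp hm
        omega
      have hmemu : v ∉ V.filter (pvQ h p) := fun hm => hv (List.mem_filter.mp hm).1
      have haddV : PySem.Set.add V v = V ++ [v] := PySem.Set.add_of_not_mem hv
      have haddu : PySem.Set.add (V.filter (pvQ h p)) v = V.filter (pvQ h p) ++ [v] :=
        PySem.Set.add_of_not_mem hmemu
      have hrsO : ∀ c : Int, v ≠ c → pvRs c 0 (p ++ [v]) = pvRs c 0 p := by
        intro c hvc; rw [hC c]; simp [hvc]
      have hQ : ∀ c ∈ V, pvQ h p c = pvQ h (p ++ [v]) c := by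
        intro c hcV
        have hvc : v ≠ c := fun hh => hv (hh ▸ hcV)
        rw [pvQ, pvQ, hrsO c hvc]
      have hhv : h v = true := hout v hv
      have hrsV : pvRs v 0 (p ++ [v]) ≤ 1 := by
        rw [hC v]; simp only [hrs0]
        split <;> omega
      have hqv : pvQ h (p ++ [v]) v = true := by simp [pvQ, hhv, hrsV]
      have hfil : (V ++ [v]).filter (pvQ h (p ++ [v])) = V.filter (pvQ h p) ++ [v] := by
        rw [List.filter_append, List.filter_congr hQ]
        simp [hqv]
      have hnd' : (V ++ [v]).Nodup := by
        rw [List.nodup_append]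
        refine ⟨hnd, List.nodup_singleton v, ?_⟩
        intro a haV b hbv hab
        subst hab
        exact hv ((List.mem_singleton.mp hbv) ▸ haV)
      have hout' : ∀ c, c ∉ V ++ [v] → h c = true := by
        intro c hc
        exact hout c (fun hcV => hc (List.mem_append.mpr (Or.inl hcV)))
      have hpV' : ∀ c ∈ p ++ [v], c ∈ V ++ [v] := by
        intro c hc
        rcases List.mem_append.mp hc with h1 | h1
        · exact List.mem_append.mpr (Or.inl (hpV c h1))
        · exact List.mem_append.mpr (Or.inr h1)
      by_cases hcv : p.getLastD 0 = v
      · have hcv2 : p.getLast?.getD 0 = v := by simpa [List.getLastD_eq_getLast?] using hcv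
        have hstep : stepA ((V.filter (pvQ h p), V), p.getLastD 0, seen) v
            = (((V ++ [v]).filter (pvQ h (p ++ [v])), V ++ [v]), (p ++ [v]).getLastD 0,
                seen) := by
          simp [stepA, hv, hcv2, hfil]
          try exact hcv2
        rw [hstep, haddV]
        exact ih (p ++ [v]) (V ++ [v]) seen hnd' hout' hpV'
          (by intro c
              rw [hseen c, hC c]
              by_cases hvc : v = c
              · subst hvc; simp [hcv2]
              · simp [hvc])
      · have hcv2 : ¬ p.getLast?.getD 0 = v := by simpa [List.getLastD_eq_getLast?] using hcv
        have hstep : stepA ((V.filter (pvQ h p), V), p.getLastD 0, seen) v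
            = (((V ++ [v]).filter (pvQ h (p ++ [v])), V ++ [v]), (p ++ [v]).getLastD 0,
                PySem.Set.add seen v) := by
          simp [stepA, hv, hcv2, hsv, hfil]
          try exact hcv2
        rw [hstep, haddV]
        exact ih (p ++ [v]) (V ++ [v]) (PySem.Set.add seen v) hnd' hout' hpV'
          (by intro c
              rw [PySem.Set.mem_add, hseen c, hC c]
              by_cases hvc : v = c
              · subst hvc; simp [hcv2, hrs0]
              · have hvc2 : ¬ c = v := fun hh => hvc hh.symm
                simp [hvc, hvc2])


theorem outer_inv : ∀ (rows : List (List Int)) (V : List Int) (h : Int → Bool),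
    V.Nodup →
    (∀ c, c ∉ V → h c = true) →
    rows.foldl rowA (V.filter h, V) =
      ((PySem.Set.update V rows.flatten).filter (fun c => h c && pvHist rows c),
        PySem.Set.update V rows.flatten) := by
  intro rows
  induction rows with
  | nil =>
    intro V h hnd hout
    simp only [List.foldl_nil, List.flatten_nil, PySem.Set.update_nil]
    refine Prod.ext ?_ rfl
    apply List.filter_congr
    intro c _
    simp [pvHist]
  | cons row rest ih =>
    intro V h hnd hout
    rw [List.foldl_cons]
    have hfe : V.filter h = V.filter (pvQ h []) := by
      apply List.filter_congr
      intro c _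
      simp [pvQ, pvRs]
    have hin := inner_inv h row [] V [] hnd hout (by intro c hc; cases hc)
      (by intro c; simp [pvRs])
    simp only [List.getLastD_nil, List.nil_append] at hin
    have hrow : rowA (V.filter h, V) row =
        ((PySem.Set.update V row).filter (pvQ h row), PySem.Set.update V row) := by
      rw [rowA, hfe]
      exact Prod.ext (congrArg Prod.fst hin) (congrArg Prod.snd hin)
    rw [hrow]
    have hnd1 : (PySem.Set.update V row).Nodup := PySem.Set.nodup_update V row hnd
    have hout1 : ∀ c, c ∉ PySem.Set.update V row → pvQ h row c = true := by
      intro c hc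
      rw [PySem.Set.mem_update] at hc
      rw [not_or] at hc
      have h1 : h c = true := hout c hc.1
      have h2 : pvRs c 0 row = 0 := pvRs_zero_of_not_mem hc.2 0
      simp [pvQ, h1, h2]
    have := ih (PySem.Set.update V row) (pvQ h row) hnd1 hout1
    rw [this, List.flatten_cons, PySem.Set.update_append]
    refine Prod.ext ?_ rfl
    apply List.filter_congr
    intro c _
    simp [pvQ, pvHist, Bool.and_assoc]


-- B-side proof machinery
def pvStepOrd (st : List Int × PySem.Set Int) (v : Int) : List Int × PySem.Set Int :=
  if ¬ st.2.contains v then (st.1 ++ [v], st.2.add v) else st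

def pvStepInfo (d : PySem.Dict Int (Int × Int × Int)) (iv : Int × Int) :
    PySem.Dict Int (Int × Int × Int) :=
  match d.get? iv.2 with
  | some t => d.insert iv.2 (t.1, iv.1, t.2.2 + 1)
  | none => d.insert iv.2 (iv.1, iv.1, 1)

-- (first column, last column, count) of colour c in p
def pvStat (c : Int) (p : List Int) : Int × Int × Int :=
  ((pvIdxs c 0 p).headD 0, (pvIdxs c 0 p).getLastD 0, ((pvIdxs c 0 p).length : Int))

theorem stepCell_fst : ∀ (l : List (Int × Int)) (ok : List Int × PySem.Set Int)
    (d : PySem.Dict Int (Int × Int × Int)),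
    (l.foldl stepCell (ok, d)).1 = (l.map Prod.snd).foldl pvStepOrd ok := by
  intro l
  induction l with
  | nil => intro ok d; rfl
  | cons iv rest ih =>
    intro ok d
    rw [List.foldl_cons, List.map_cons, List.foldl_cons]
    exact ih _ _

theorem stepCell_snd : ∀ (l : List (Int × Int)) (ok : List Int × PySem.Set Int)
    (d : PySem.Dict Int (Int × Int × Int)),
    (l.foldl stepCell (ok, d)).2 = l.foldl pvStepInfo d := by
  intro l
  induction l with
  | nil => intro ok d; rfl
  | cons iv rest ih =>
    intro ok d
    rw [List.foldl_cons, List.foldl_cons]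
    exact ih _ _

theorem ordCells : ∀ (cells : List Int) (s : List Int),
    cells.foldl pvStepOrd (s, s) = (PySem.Set.update s cells, PySem.Set.update s cells) := by
  intro cells
  induction cells with
  | nil => intro s; simp [PySem.Set.update]
  | cons v rest ih =>
    intro s
    rw [List.foldl_cons, PySem.Set.update_cons, ← ih (PySem.Set.add s v)]
    congr 1
    by_cases hv : v ∈ s
    · simp [pvStepOrd, hv]
    · simp [pvStepOrd, hv]

theorem pvIdxs_append : ∀ (xs : List Int) (c k v : Int),
    pvIdxs c k (xs ++ [v]) = pvIdxs c k xs ++ (if v = c then [k + (xs.length : Int)] else []) := by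
  intro xs
  induction xs with
  | nil => intro c k v; simp [pvIdxs]
  | cons x t ih =>
    intro c k v
    rw [List.cons_append, pvIdxs, ih c (k + 1) v, pvIdxs]
    have : k + 1 + (t.length : Int) = k + ((x :: t).length : Int) := by
      simp; ring
    rw [this, List.append_assoc]

theorem infoInv : ∀ (t p : List Int) (d : PySem.Dict Int (Int × Int × Int)),
    (∀ c : Int, d.get? c = if c ∈ p then some (pvStat c p) else none) →
    ∀ c : Int, ((PySem.List.enumerate t (p.length : Int)).foldl pvStepInfo d).get? c
      = if c ∈ p ++ t then some (pvStat c (p ++ t)) else none := by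
  intro t
  induction t with
  | nil => intro p d hd c; simpa using hd c
  | cons x t' ih =>
    intro p d hd c
    rw [PySem.List.enumerate_cons, List.foldl_cons]
    have hidx : ∀ c' : Int, pvIdxs c' 0 (p ++ [x])
        = pvIdxs c' 0 p ++ (if x = c' then [(p.length : Int)] else []) := by
      intro c'
      rw [pvIdxs_append p c' 0 x]
      simp
    have hd' : ∀ c' : Int, (pvStepInfo d ((p.length : Int), x)).get? c'
        = if c' ∈ p ++ [x] then some (pvStat c' (p ++ [x])) else none := by
      intro c'
      by_cases hx : x ∈ p
      · have hg : d.get? x = some (pvStat x p) := by rw [hd x, if_pos hx]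
        have hne : pvIdxs x 0 p ≠ [] := fun hnil => (pvIdxs_eq_nil_iff.mp hnil) hx
        rw [show pvStepInfo d ((p.length : Int), x)
            = d.insert x ((pvStat x p).1, (p.length : Int), (pvStat x p).2.2 + 1) from by
          rw [pvStepInfo]; rw [show ((p.length : Int), x).2 = x from rfl, hg]]
        rw [PySem.Dict.get?_insert]
        by_cases hcx : c' = x
        · subst hcx
          rw [if_pos rfl, if_pos (by simp)]
          rcases hl : pvIdxs c' 0 p with _ | ⟨a, l0⟩
          · exact absurd hl hne
          · refine congrArg some ?_
            rw [pvStat, pvStat, hidx c', if_pos rfl, hl]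
            refine Prod.ext ?_ (Prod.ext ?_ ?_)
            · simp
            · show ((p.length : Int)) = ((a :: l0) ++ [(p.length : Int)]).getLastD 0
              rw [List.getLastD_concat]
            · show (((a :: l0).length : Nat) : Int) + 1 = ((((a :: l0) ++ [(p.length : Int)]).length : Nat) : Int)
              simp
        · rw [if_neg hcx, hd c']
          have hmem : (c' ∈ p ++ [x]) ↔ c' ∈ p := by simp [hcx]
          by_cases hcp : c' ∈ p
          · rw [if_pos hcp, if_pos (hmem.mpr hcp)]
            rw [pvStat, pvStat, hidx c', if_neg (fun hh => hcx hh.symm), List.append_nil]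
          · rw [if_neg hcp, if_neg (fun hh => hcp (hmem.mp hh))]
      · have hg : d.get? x = none := by rw [hd x, if_neg hx]
        have hnil : pvIdxs x 0 p = [] := pvIdxs_eq_nil_iff.mpr hx
        rw [show pvStepInfo d ((p.length : Int), x)
            = d.insert x ((p.length : Int), (p.length : Int), 1) from by
          rw [pvStepInfo]; rw [show ((p.length : Int), x).2 = x from rfl, hg]]
        rw [PySem.Dict.get?_insert]
        by_cases hcx : c' = x
        · subst hcx
          rw [if_pos rfl, if_pos (by simp)]
          rw [pvStat, hidx c', if_pos rfl, hnil, List.nil_append]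
          simp
        · rw [if_neg hcx, hd c']
          have hmem : (c' ∈ p ++ [x]) ↔ c' ∈ p := by simp [hcx]
          by_cases hcp : c' ∈ p
          · rw [if_pos hcp, if_pos (hmem.mpr hcp)]
            rw [pvStat, pvStat, hidx c', if_neg (fun hh => hcx hh.symm), List.append_nil]
          · rw [if_neg hcp, if_neg (fun hh => hcp (hmem.mp hh))]
    have hcons := ih (p ++ [x]) _ hd' c
    have hlen : (((p ++ [x]).length : Nat) : Int) = (p.length : Int) + 1 := by
      simp
    rw [hlen] at hcons
    rw [show (p ++ [x]) ++ t' = p ++ x :: t' from by simp] at hcons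
    exact hcons

theorem infoNodupKeys : ∀ (l : List (Int × Int)) (d : PySem.Dict Int (Int × Int × Int)),
    d.keys.Nodup → (l.foldl pvStepInfo d).keys.Nodup := by
  intro l
  induction l with
  | nil => intro d hd; exact hd
  | cons iv rest ih =>
    intro d hd
    rw [List.foldl_cons]
    apply ih
    cases hget : d.get? iv.2 with
    | some t => rw [pvStepInfo, hget]; exact PySem.Dict.nodup_keys_insert d iv.2 _ hd
    | none => rw [pvStepInfo, hget]; exact PySem.Dict.nodup_keys_insert d iv.2 _ hd

theorem mem_badFold : ∀ (its : List (Int × Int × Int × Int)) (b : PySem.Set Int) (x : Int),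
    x ∈ its.foldl
        (fun b it => if it.2.2.1 - it.2.1 + 1 ≠ it.2.2.2 then PySem.Set.add b it.1 else b) b
      ↔ x ∈ b ∨ ∃ it ∈ its, it.1 = x ∧ it.2.2.1 - it.2.1 + 1 ≠ it.2.2.2 := by
  intro its
  induction its with
  | nil => intro b x; simp
  | cons it rest ih =>
    intro b x
    rw [List.foldl_cons]
    by_cases hc : it.2.2.1 - it.2.1 + 1 ≠ it.2.2.2
    · rw [if_pos hc, ih]
      rw [PySem.Set.mem_add]
      constructor
      · rintro ((hb | he) | hr)
        · exact Or.inl hb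
        · exact Or.inr ⟨it, by simp, he.symm, hc⟩
        · rcases hr with ⟨jt, hjt, hx, hcond⟩
          exact Or.inr ⟨jt, by simp [hjt], hx, hcond⟩
      · rintro (hb | ⟨jt, hjt, hx, hcond⟩)
        · exact Or.inl (Or.inl hb)
        · rcases List.mem_cons.mp hjt with rfl | hjt'
          · exact Or.inl (Or.inr hx.symm)
          · exact Or.inr ⟨jt, hjt', hx, hcond⟩
    · rw [if_neg hc, ih]
      constructor
      · rintro (hb | ⟨jt, hjt, hx, hcond⟩)
        · exact Or.inl hb
        · exact Or.inr ⟨jt, by simp [hjt], hx, hcond⟩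
      · rintro (hb | ⟨jt, hjt, hx, hcond⟩)
        · exact Or.inl hb
        · rcases List.mem_cons.mp hjt with rfl | hjt'
          · exact absurd hcond hc
          · exact Or.inr ⟨jt, hjt', hx, hcond⟩

theorem rowB_fst (row : List Int) (s bad : List Int) :
    (rowB ((s, s), bad) row).1 = (PySem.Set.update s row, PySem.Set.update s row) := by
  show ((PySem.List.enumerate row).foldl stepCell ((s, s), PySem.Dict.empty)).1 = _
  rw [stepCell_fst]
  rw [show (PySem.List.enumerate row).map Prod.snd = row from PySem.List.map_snd_enumerate row 0]
  exact ordCells row s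

theorem rowB_snd (row : List Int) (st : List Int × PySem.Set Int) (bad : PySem.Set Int) :
    ∀ c : Int, c ∈ (rowB (st, bad) row).2 ↔ c ∈ bad ∨ ¬ pvOk (pvIdxs c 0 row) = true := by
  intro c
  show c ∈ (((PySem.List.enumerate row).foldl stepCell (st, PySem.Dict.empty)).2.items.foldl
      (fun b it => if it.2.2.1 - it.2.1 + 1 ≠ it.2.2.2 then PySem.Set.add b it.1 else b) bad)
    ↔ _
  rw [stepCell_snd]
  have hinfo : ∀ c' : Int, ((PySem.List.enumerate row 0).foldl pvStepInfo PySem.Dict.empty).get? c'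
      = if c' ∈ row then some (pvStat c' row) else none := by
    have := infoInv row [] PySem.Dict.empty (by intro c'; simp)
    simpa using this
  have hnd : ((PySem.List.enumerate row 0).foldl pvStepInfo PySem.Dict.empty).keys.Nodup :=
    infoNodupKeys _ _ (by simp [PySem.Dict.keys, PySem.Dict.empty])
  rw [mem_badFold]
  have hiff : (∃ it ∈ ((PySem.List.enumerate row 0).foldl pvStepInfo PySem.Dict.empty).items,
      it.1 = c ∧ it.2.2.1 - it.2.1 + 1 ≠ it.2.2.2) ↔ ¬ pvOk (pvIdxs c 0 row) = true := by
    constructor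
    · rintro ⟨⟨k, v⟩, hit, hx, hcond⟩
      simp only at hx
      subst hx
      have hget : ((PySem.List.enumerate row 0).foldl pvStepInfo PySem.Dict.empty).get? k
          = some v := PySem.Dict.get?_of_mem_items _ hit hnd
      rw [hinfo k] at hget
      by_cases hcr : k ∈ row
      · rw [if_pos hcr] at hget
        have hval : v = pvStat k row := by
          injection hget with h1
          exact h1.symm
        have hne : pvIdxs k 0 row ≠ [] := fun hnil => (pvIdxs_eq_nil_iff.mp hnil) hcr
        rcases hl : pvIdxs k 0 row with _ | ⟨a, l0⟩
        · exact absurd hl hne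
        · intro hok
          rw [pvOk] at hok
          simp only [List.isEmpty_cons, Bool.false_or, beq_iff_eq] at hok
          rw [hval, pvStat, hl] at hcond
          simp only at hcond
          exact hcond hok
      · rw [if_neg hcr] at hget
        cases hget
    · intro hnok
      have hne : pvIdxs c 0 row ≠ [] := by
        intro hnil
        rw [hnil] at hnok
        exact hnok rfl
      have hcr : c ∈ row := by
        by_contra hcr
        exact hne (pvIdxs_eq_nil_iff.mpr hcr)
      have hget : ((PySem.List.enumerate row 0).foldl pvStepInfo PySem.Dict.empty).get? c
          = some (pvStat c row) := by rw [hinfo c, if_pos hcr]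
      refine ⟨(c, pvStat c row), PySem.Dict.mem_items_of_get?_eq_some _ hget, rfl, ?_⟩
      rcases hl : pvIdxs c 0 row with _ | ⟨a, l0⟩
      · exact absurd hl hne
      · rw [pvStat, hl]
        simp only
        intro heq
        apply hnok
        rw [pvOk, hl]
        simp only [List.isEmpty_cons, Bool.false_or, beq_iff_eq]
        exact heq
  rw [hiff]

theorem rowsB_char : ∀ (rows : List (List Int)) (s bad : List Int),
    (rows.foldl rowB ((s, s), bad)).1
        = (PySem.Set.update s rows.flatten, PySem.Set.update s rows.flatten)
      ∧ ∀ c : Int, c ∈ (rows.foldl rowB ((s, s), bad)).2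
        ↔ c ∈ bad ∨ ∃ row ∈ rows, ¬ pvOk (pvIdxs c 0 row) = true := by
  intro rows
  induction rows with
  | nil =>
    intro s bad
    refine ⟨by simp [PySem.Set.update_nil], by intro c; simp⟩
  | cons row rest ih =>
    intro s bad
    rw [List.foldl_cons]
    have hsplit : rowB ((s, s), bad) row
        = ((PySem.Set.update s row, PySem.Set.update s row), (rowB ((s, s), bad) row).2) :=
      Prod.ext (rowB_fst row s bad) rfl
    rw [hsplit]
    obtain ⟨ih1, ih2⟩ := ih (PySem.Set.update s row) ((rowB ((s, s), bad) row).2)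
    constructor
    · rw [ih1, List.flatten_cons, PySem.Set.update_append]
    · intro c
      rw [ih2 c, rowB_snd row (s, s) bad c, List.exists_mem_cons_iff]
      tauto

theorem solve_eq_alt (n : Int) (grid : List (List Int)) : solve n grid = solve_alt n grid := by
  rw [solve, solve_alt]
  have hA := outer_inv grid [] (fun _ => true) List.nodup_nil (fun _ _ => rfl)
  rw [show (List.filter (fun _ => true) [] : List Int) = [] from rfl] at hA
  simp only [PySem.Set.update_nil_left] at hA
  set F := PySem.Set.ofList grid.flatten with hF
  have hA2 : grid.foldl rowA (PySem.Set.empty, PySem.Set.empty)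
      = (List.filter (fun c => true && pvHist grid c) F, F) := hA
  show (if ((grid.foldl rowA (PySem.Set.empty, PySem.Set.empty)).1).contains 0 = true
      then PySem.Set.discard ((grid.foldl rowA (PySem.Set.empty, PySem.Set.empty)).1) 0
      else (grid.foldl rowA (PySem.Set.empty, PySem.Set.empty)).1) =
    PySem.Set.ofList (((grid.foldl rowB (([], PySem.Set.empty), PySem.Set.empty)).1.1).filter
      (fun c => c != 0 &&
        !((grid.foldl rowB (([], PySem.Set.empty), PySem.Set.empty)).2.contains c)))
  rw [hA2]
  have hR1 : (grid.foldl rowB (([], PySem.Set.empty), PySem.Set.empty)).1 = (F, F) := by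
    have := (rowsB_char grid [] []).1
    simp only [PySem.Set.update_nil_left] at this
    exact this
  have hR2 : ∀ c : Int, c ∈ (grid.foldl rowB (([], PySem.Set.empty), PySem.Set.empty)).2
      ↔ ∃ row ∈ grid, ¬ pvOk (pvIdxs c 0 row) = true := by
    intro c
    have := (rowsB_char grid [] []).2 c
    simpa using this
  have hR11 : (grid.foldl rowB (([], PySem.Set.empty), PySem.Set.empty)).1.1 = F := by
    rw [hR1]
  change (if (List.filter (fun c => true && pvHist grid c) F : PySem.Set Int).contains 0 = true then
      PySem.Set.discard (List.filter (fun c => true && pvHist grid c) F) 0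
    else List.filter (fun c => true && pvHist grid c) F) =
    PySem.Set.ofList (((grid.foldl rowB (([], PySem.Set.empty), PySem.Set.empty)).1.1).filter
      (fun c => c != 0 &&
        !((grid.foldl rowB (([], PySem.Set.empty), PySem.Set.empty)).2.contains c)))
  rw [hR11]
  have hFnd : F.Nodup := PySem.Set.nodup_ofList _
  have hpred : ∀ c ∈ F, (!(c == 0) && (true && pvHist grid c))
      = (c != 0 && !((grid.foldl rowB (([], PySem.Set.empty), PySem.Set.empty)).2.contains c)) := by
    intro c _
    by_cases hc : c = 0
    · subst hc; simp
    · have h0c : (0 : Int) ≠ c := fun hh => hc hh.symm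
      have hph : pvHist grid c
          = !((grid.foldl rowB (([], PySem.Set.empty), PySem.Set.empty)).2.contains c) := by
        by_cases hb : c ∈ (grid.foldl rowB (([], PySem.Set.empty), PySem.Set.empty)).2
        · have hcb : ((grid.foldl rowB (([], PySem.Set.empty), PySem.Set.empty)).2
              : PySem.Set Int).contains c = true := by simpa using hb
          obtain ⟨row, hrow, hnok⟩ := (hR2 c).mp hb
          have hgt : ¬ pvRs c 0 row ≤ 1 := fun hle => hnok ((pvRs_le_one_iff 0 h0c).mp hle)
          have : pvHist grid c = false := by
            rw [pvHist]
            apply List.all_eq_false.mpr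
            exact ⟨row, hrow, by simpa using hgt⟩
          rw [this, hcb]
          rfl
        · have hcb : ((grid.foldl rowB (([], PySem.Set.empty), PySem.Set.empty)).2
              : PySem.Set Int).contains c = false := by simpa using hb
          have : pvHist grid c = true := by
            rw [pvHist]
            apply List.all_eq_true.mpr
            intro r hr
            have hok : pvOk (pvIdxs c 0 r) = true := by
              by_contra hnok
              exact hb ((hR2 c).mpr ⟨r, hr, hnok⟩)
            simpa using (pvRs_le_one_iff 0 h0c).mpr hok
          rw [this, hcb]
          rfl
      rw [hph]
      simp [bne]
  have hmain : (F.filter (fun c => true && pvHist grid c)).filter (fun y => !(y == 0))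
      = F.filter (fun c => c != 0 &&
          !((grid.foldl rowB (([], PySem.Set.empty), PySem.Set.empty)).2.contains c)) := by
    rw [List.filter_filter]
    exact List.filter_congr hpred
  by_cases h0 : (0 : Int) ∈ F.filter (fun c => true && pvHist grid c)
  · have hc0 : (F.filter (fun c => true && pvHist grid c) : PySem.Set Int).contains 0 = true := by
      simpa using h0
    rw [if_pos hc0, PySem.Set.discard, hmain,
      PySem.Set.ofList_eq_self_of_nodup _ (List.Nodup.filter _ hFnd)]
  · have hc0 : (F.filter (fun c => true && pvHist grid c) : PySem.Set Int).contains 0 = false := by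
      simpa using h0
    rw [if_neg (by rw [hc0]; exact Bool.false_ne_true),
      show F.filter (fun c => true && pvHist grid c)
        = (F.filter (fun c => true && pvHist grid c)).filter (fun y => !(y == 0)) from
        (List.filter_eq_self.mpr (by
          intro a ha
          have : a ≠ 0 := fun hh => h0 (hh ▸ ha)
          simp [this])).symm,
      hmain, PySem.Set.ofList_eq_self_of_nodup _ (List.Nodup.filter _ hFnd)]

-- ===== VERDICT (by name: the statement is the Claim_ definition above) =====
theorem solve_spec : Claim_equal_solve := by
  intro n grid _
  exact solve_eq_alt n grid
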